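-- pv_equiv track=rewrite | github.com/yheechan/LIGNex1_FL_dataset | SBFL_dataset_generator/bin_on_machine/1_measure_sbfl_features.py | calculate_base_spectrum
-- ===== SOURCE A (Python) =====
-- def calculate_base_spectrum(line, tc_dict):
--     executed = 0
--     not_executed = 0
--
--     for tc_id, tc_name in tc_dict.items():
--         if line[tc_id] == '1':
--             executed += 1
--         else:
--             not_executed += 1
--
--     return executed, not_executed
-- ===== SOURCE B (Python) =====
-- def calculate_base_spectrum(line, tc_dict):
--     def go(keys):
--         if not keys:
--             return (0, 0)
--         executed, not_executed = go(keys[1:])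
--         if line[keys[0]] == '1':
--             return (executed + 1, not_executed)
--         return (executed, not_executed + 1)
--     return go(list(tc_dict))
-- ===== Notes on version B (the rewrite author's own statement) =====
-- stated objective: alternative
-- what changed: Replaces the iterative loop with two parallel accumulators by a structural recursion over the key list that builds the pair back-to-front (the tail is counted first, then the head's contribution is added to the returned pair).
import Mathlib
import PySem

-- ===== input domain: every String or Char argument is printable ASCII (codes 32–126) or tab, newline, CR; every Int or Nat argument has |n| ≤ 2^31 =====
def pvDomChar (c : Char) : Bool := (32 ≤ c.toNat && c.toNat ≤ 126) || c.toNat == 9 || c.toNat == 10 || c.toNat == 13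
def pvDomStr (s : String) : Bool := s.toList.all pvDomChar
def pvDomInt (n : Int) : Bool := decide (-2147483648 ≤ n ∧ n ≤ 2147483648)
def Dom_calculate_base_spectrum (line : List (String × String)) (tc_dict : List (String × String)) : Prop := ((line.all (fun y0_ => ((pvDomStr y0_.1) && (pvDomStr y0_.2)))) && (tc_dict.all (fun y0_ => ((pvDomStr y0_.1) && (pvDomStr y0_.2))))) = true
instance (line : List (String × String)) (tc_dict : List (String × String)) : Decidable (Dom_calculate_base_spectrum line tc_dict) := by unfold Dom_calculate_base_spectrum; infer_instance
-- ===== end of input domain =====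

-- ===== PORT A =====
-- B replaces A's left-to-right loop with two branch accumulators by a structural recursion
-- that counts the tail first and adds the head's contribution to the returned pair (alternative decomposition).
-- A raises KeyError when some tc_dict key is missing from line: those inputs are excluded by Pre_.
def calculate_base_spectrum (line : List (String × String)) (tc_dict : List (String × String)) : Int × Int :=
  tc_dict.foldl
    (fun s p =>
      if ((line.lookup p.1).getD "" == "1") then (s.1 + 1, s.2) else (s.1, s.2 + 1))
    (0, 0)

-- ===== PORT B =====
def cbs_go (line : List (String × String)) : List (String × String) → Int × Int
  | [] => (0, 0)
  | p :: tl =>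
    let r := cbs_go line tl
    if ((line.lookup p.1).getD "" == "1") then (r.1 + 1, r.2) else (r.1, r.2 + 1)

def calculate_base_spectrum_alt (line : List (String × String)) (tc_dict : List (String × String)) : Int × Int :=
  cbs_go line tc_dict

-- ===== PRECONDITION & SPEC =====
-- Pre_ excludes exactly the inputs on which Python A raises KeyError: some key of tc_dict absent from line.
def Pre_calculate_base_spectrum (line : List (String × String)) (tc_dict : List (String × String)) : Prop :=
  ∀ p ∈ tc_dict, (line.lookup p.1).isSome
instance (line : List (String × String)) (tc_dict : List (String × String)) : Decidable (Pre_calculate_base_spectrum line tc_dict) := by unfold Pre_calculate_base_spectrum; infer_instance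
def pvWitness_calculate_base_spectrum : (List (String × String)) × (List (String × String)) :=
  ([("t1", "1"), ("t2", "0")], [("t1", "tc_a"), ("t2", "tc_b")])
def Spec_calculate_base_spectrum (line : List (String × String)) (tc_dict : List (String × String)) (out : Int × Int) : Prop := out = calculate_base_spectrum_alt line tc_dict
instance (line : List (String × String)) (tc_dict : List (String × String)) (out : Int × Int) : Decidable (Spec_calculate_base_spectrum line tc_dict out) := by unfold Spec_calculate_base_spectrum; infer_instance

-- ===== CLAIM =====
def Claim_equal_calculate_base_spectrum : Prop := ∀ (line : List (String × String)) (tc_dict : List (String × String)), Dom_calculate_base_spectrum line tc_dict → Pre_calculate_base_spectrum line tc_dict → Spec_calculate_base_spectrum line tc_dict (calculate_base_spectrum line tc_dict)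

-- ===== LEMMAS AND PROOFS =====
lemma cbs_fold (line : List (String × String)) (l : List (String × String)) (e ne : Int) :
    l.foldl
      (fun s p =>
        if ((line.lookup p.1).getD "" == "1") then (s.1 + 1, s.2) else (s.1, s.2 + 1))
      (e, ne)
    = (e + (cbs_go line l).1, ne + (cbs_go line l).2) := by
  induction l generalizing e ne with
  | nil => simp [cbs_go]
  | cons hd tl ih =>
    by_cases h : ((line.lookup hd.1).getD "" == "1") = true
    · rw [List.foldl_cons, if_pos h, ih]
      simp [cbs_go, h, Prod.ext_iff]
      omega
    · rw [List.foldl_cons, if_neg h, ih]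
      simp [cbs_go, h, Prod.ext_iff]
      omega

-- ===== VERDICT =====
theorem calculate_base_spectrum_spec : Claim_equal_calculate_base_spectrum := by
  intro line tc_dict _ _
  unfold Spec_calculate_base_spectrum calculate_base_spectrum calculate_base_spectrum_alt
  rw [cbs_fold]
  simp
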